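-- pv_equiv track=rewrite | github.com/ipc2023-classical/planner10 | src/search/pdbs/local_search.py | compute_operator_constraint
-- ===== SOURCE A (Python) =====
-- def compute_operator_constraint(operator_count, constraints):
--
--     # key: operator, value: mentioned constraint
--     operator_constraint = dict()
--
--     for op in operator_count:
--         operator_constraint[op] = list()
--         for constraint in constraints:
--             if op in constraint:
--                 operator_constraint[op].append(constraint)
--
--     return operator_constraint
-- ===== SOURCE B (Python) =====
-- def compute_operator_constraint(operator_count, constraints):
--     # inverted index: one pass over the constraints, appending each constraint
--     # to the lists of the operators it mentions
--     operator_constraint = {op: [] for op in operator_count}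
--     for constraint in constraints:
--         seen = set()
--         for op in constraint:
--             if op in operator_constraint and op not in seen:
--                 seen.add(op)
--                 operator_constraint[op].append(constraint)
--     return operator_constraint
-- ===== Notes on version B (the rewrite author's own statement) =====
-- stated objective: faster
-- what changed: Replaced the nested scan of all constraints per operator by an inverted index: one pass over the constraints appends each constraint to the lists of the (deduplicated) operators it mentions, using dict membership for the operator set.
import Mathlib
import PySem

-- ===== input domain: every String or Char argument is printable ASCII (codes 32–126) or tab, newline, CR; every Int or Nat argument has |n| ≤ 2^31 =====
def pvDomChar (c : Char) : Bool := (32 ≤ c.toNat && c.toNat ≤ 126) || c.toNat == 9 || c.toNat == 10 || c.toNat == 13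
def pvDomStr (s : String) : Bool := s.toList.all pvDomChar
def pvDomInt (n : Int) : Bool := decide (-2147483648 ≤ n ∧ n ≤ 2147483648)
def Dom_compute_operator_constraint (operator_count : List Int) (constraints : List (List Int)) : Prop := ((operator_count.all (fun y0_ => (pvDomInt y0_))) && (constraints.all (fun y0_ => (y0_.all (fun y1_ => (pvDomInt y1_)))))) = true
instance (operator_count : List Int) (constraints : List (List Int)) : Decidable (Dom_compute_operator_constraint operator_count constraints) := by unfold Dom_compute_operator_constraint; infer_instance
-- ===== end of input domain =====

-- B replaces A's per-operator scan of all constraints by a single inverted-index pass over the constraints (objective: faster).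


-- ===== PORT A =====
def compute_operator_constraint (operator_count : List Int) (constraints : List (List Int)) : List (Int × List (List Int)) :=
  (operator_count.foldl
    (fun d op =>
      constraints.foldl
        (fun d constraint =>
          if op ∈ constraint then d.insert op (d.getD op [] ++ [constraint]) else d)
        (d.insert op []))
    PySem.Dict.empty).items

-- ===== PORT B =====
def compute_operator_constraint_alt (operator_count : List Int) (constraints : List (List Int)) : List (Int × List (List Int)) :=
  let d0 : PySem.Dict Int (List (List Int)) :=
    operator_count.foldl (fun d op => d.insert op []) PySem.Dict.empty
  (constraints.foldl
    (fun d constraint =>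
      (constraint.foldl
        (fun (st : PySem.Dict Int (List (List Int)) × PySem.Set Int) op =>
          if st.1.contains op = true ∧ op ∉ st.2 then
            (st.1.insert op (st.1.getD op [] ++ [constraint]), st.2.add op)
          else st)
        (d, PySem.Set.empty)).1)
    d0).items

-- ===== PRECONDITION & SPEC =====
def Spec_compute_operator_constraint (operator_count : List Int) (constraints : List (List Int)) (out : List (Int × List (List Int))) : Prop := out = compute_operator_constraint_alt operator_count constraints
instance (operator_count : List Int) (constraints : List (List Int)) (out : List (Int × List (List Int))) : Decidable (Spec_compute_operator_constraint operator_count constraints out) := by unfold Spec_compute_operator_constraint; infer_instance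

-- ===== CLAIM (what is proved, stated in full; the proofs are below) =====
def Claim_equal_compute_operator_constraint : Prop := ∀ (operator_count : List Int) (constraints : List (List Int)), Dom_compute_operator_constraint operator_count constraints → Spec_compute_operator_constraint operator_count constraints (compute_operator_constraint operator_count constraints)

-- ===== LEMMAS AND PROOFS =====

-- A's inner loop over the constraints only ever touches key `op`: it sets it to the filtered constraint list.
theorem A_inner (cs : List (List Int)) (op : Int) (d : PySem.Dict Int (List (List Int))) (acc : List (List Int)) :
    cs.foldl (fun d c => if op ∈ c then d.insert op (d.getD op [] ++ [c]) else d) (d.insert op acc)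
      = d.insert op (acc ++ cs.filter (fun c => decide (op ∈ c))) := by
  induction cs generalizing acc with
  | nil => simp
  | cons c cs ih =>
    by_cases h : op ∈ c
    · simp only [List.foldl_cons, if_pos h,
        PySem.Dict.getD_insert_self, PySem.Dict.insert_insert_self]
      rw [ih (acc ++ [c])]
      simp [h]
    · simp only [List.foldl_cons, if_neg h]
      rw [ih acc]
      simp [h]

-- value assigned to each key by a fold of inserts whose value depends only on the key
theorem getD_foldl_insertF (ops : List Int) (F : Int → List (List Int)) (d : PySem.Dict Int (List (List Int))) (k : Int) :
    (ops.foldl (fun d op => d.insert op (F op)) d).getD k [] = if k ∈ ops then F k else d.getD k [] := by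
  induction ops generalizing d with
  | nil => simp
  | cons op rest ih =>
    simp only [List.foldl_cons, ih, PySem.Dict.getD_insert, List.mem_cons]
    by_cases h1 : k ∈ rest <;> by_cases h2 : k = op <;> simp [h1, h2]

-- B's inner loop over one constraint: appends the constraint once to each key it mentions that is present and unseen
theorem B_inner (cstr : List Int) (l : List Int) (d : PySem.Dict Int (List (List Int))) (seen : PySem.Set Int)
    (hd : d.keys.Nodup) :
    (l.foldl
        (fun (st : PySem.Dict Int (List (List Int)) × PySem.Set Int) op =>
          if st.1.contains op = true ∧ op ∉ st.2 then
            (st.1.insert op (st.1.getD op [] ++ [cstr]), st.2.add op)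
          else st)
        (d, seen)).1.keys = d.keys ∧
    ∀ k, (l.foldl
        (fun (st : PySem.Dict Int (List (List Int)) × PySem.Set Int) op =>
          if st.1.contains op = true ∧ op ∉ st.2 then
            (st.1.insert op (st.1.getD op [] ++ [cstr]), st.2.add op)
          else st)
        (d, seen)).1.getD k []
      = if k ∈ l ∧ k ∈ d.keys ∧ k ∉ seen then d.getD k [] ++ [cstr] else d.getD k [] := by
  induction l generalizing d seen with
  | nil => simp
  | cons op rest ih =>
    by_cases hc : d.contains op = true ∧ op ∉ seen
    · have hop : op ∈ d.keys := by
        have := hc.1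
        rw [PySem.Dict.contains_eq_decide_mem_keys] at this
        simpa using this
      have hkeys : (d.insert op (d.getD op [] ++ [cstr])).keys = d.keys :=
        PySem.Dict.keys_insert_of_contains _ _ hc.1
      have hd' : (d.insert op (d.getD op [] ++ [cstr])).keys.Nodup := by rw [hkeys]; exact hd
      obtain ⟨ihk, ihg⟩ := ih (d.insert op (d.getD op [] ++ [cstr])) (seen.add op) hd'
      simp only [List.foldl_cons, if_pos hc]
      refine ⟨by rw [ihk, hkeys], ?_⟩
      intro k
      rw [ihg k, hkeys]
      by_cases hk : k = op
      · subst hk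
        have h1 : k ∈ PySem.Set.add seen k := by rw [PySem.Set.mem_add]; right; rfl
        simp [hop, hc.2, PySem.Dict.getD_insert_self]
      · have h1 : (k ∈ PySem.Set.add seen op) ↔ k ∈ seen := by
          rw [PySem.Set.mem_add]; constructor
          · rintro (h | h); exact h; exact absurd h hk
          · exact Or.inl
        rw [PySem.Dict.getD_insert_of_ne _ _ _ hk]
        by_cases h2 : k ∈ rest <;> by_cases h3 : k ∈ d.keys <;> by_cases h4 : k ∈ seen <;>
          simp [h1, h2, h3, h4, hk]
    · simp only [List.foldl_cons, if_neg hc]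
      obtain ⟨ihk, ihg⟩ := ih d seen hd
      refine ⟨ihk, ?_⟩
      intro k
      rw [ihg k]
      by_cases hk : k = op
      · subst hk
        have : ¬ (k ∈ d.keys ∧ k ∉ seen) := by
          intro ⟨h1, h2⟩
          exact hc ⟨by rw [PySem.Dict.contains_eq_decide_mem_keys]; simpa using h1, h2⟩
        by_cases h2 : k ∈ rest
        · simp [h2]
        · simp [h2]; tauto
      · simp [hk]

-- B's outer loop: each present key accumulates the constraints that mention it, in order
theorem B_outer (cs : List (List Int)) (d : PySem.Dict Int (List (List Int))) (hd : d.keys.Nodup) :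
    (cs.foldl
        (fun d constraint =>
          (constraint.foldl
            (fun (st : PySem.Dict Int (List (List Int)) × PySem.Set Int) op =>
              if st.1.contains op = true ∧ op ∉ st.2 then
                (st.1.insert op (st.1.getD op [] ++ [constraint]), st.2.add op)
              else st)
            (d, PySem.Set.empty)).1)
        d).keys = d.keys ∧
    ∀ k ∈ d.keys, (cs.foldl
        (fun d constraint =>
          (constraint.foldl
            (fun (st : PySem.Dict Int (List (List Int)) × PySem.Set Int) op =>
              if st.1.contains op = true ∧ op ∉ st.2 then
                (st.1.insert op (st.1.getD op [] ++ [constraint]), st.2.add op)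
              else st)
            (d, PySem.Set.empty)).1)
        d).getD k []
      = d.getD k [] ++ cs.filter (fun c => decide (k ∈ c)) := by
  induction cs generalizing d with
  | nil => simp
  | cons cstr rest ih =>
    obtain ⟨hk1, hg1⟩ := B_inner cstr cstr d PySem.Set.empty hd
    set d1 := (cstr.foldl
        (fun (st : PySem.Dict Int (List (List Int)) × PySem.Set Int) op =>
          if st.1.contains op = true ∧ op ∉ st.2 then
            (st.1.insert op (st.1.getD op [] ++ [cstr]), st.2.add op)
          else st)
        (d, PySem.Set.empty)).1 with hd1def
    have hd1 : d1.keys.Nodup := by rw [hk1]; exact hd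
    obtain ⟨ihk, ihg⟩ := ih d1 hd1
    simp only [List.foldl_cons]
    refine ⟨by rw [ihk, hk1], ?_⟩
    intro k hkmem
    rw [ihg k (by rw [hk1]; exact hkmem), hg1 k]
    have hns : k ∉ (PySem.Set.empty : PySem.Set Int) := by simp [PySem.Set.empty]
    by_cases hc : k ∈ cstr
    · simp [hc, hkmem]
    · simp [hc, hkmem]

-- ===== VERDICT (by name: the statement is the Claim_ definition above) =====
theorem compute_operator_constraint_spec : Claim_equal_compute_operator_constraint := by
  intro ops cs _
  unfold Spec_compute_operator_constraint compute_operator_constraint compute_operator_constraint_alt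
  -- rewrite A's body via A_inner
  have hA : ops.foldl
      (fun d op =>
        cs.foldl
          (fun d constraint =>
            if op ∈ constraint then d.insert op (d.getD op [] ++ [constraint]) else d)
          (d.insert op []))
      PySem.Dict.empty
      = ops.foldl (fun d op => d.insert op (cs.filter (fun c => decide (op ∈ c)))) PySem.Dict.empty := by
    apply PySem.List.foldl_congr_mem
    intro acc op _
    rw [A_inner]
    simp
  rw [hA]
  set dA := ops.foldl (fun d op => d.insert op (cs.filter (fun c => decide (op ∈ c)))) PySem.Dict.empty with hdA
  set d0 := ops.foldl (fun (d : PySem.Dict Int (List (List Int))) op => d.insert op []) PySem.Dict.empty with hd0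
  have hkA : dA.keys = PySem.Set.ofList ops := by
    rw [hdA, PySem.Dict.keys_foldl_insert (f := fun _ op => cs.filter (fun c => decide (op ∈ c)))]
    simp [PySem.Set.ofList_eq_foldl, PySem.Set.update]
  have hnA : dA.keys.Nodup := by
    rw [hdA]
    exact PySem.Dict.nodup_keys_foldl_insert _ _ _ PySem.Dict.nodup_keys_empty
  have hk0 : d0.keys = PySem.Set.ofList ops := by
    rw [hd0, PySem.Dict.keys_foldl_insert (f := fun _ _ => [])]
    simp [PySem.Set.ofList_eq_foldl, PySem.Set.update]
  have hn0 : d0.keys.Nodup := by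
    rw [hd0]
    exact PySem.Dict.nodup_keys_foldl_insert _ _ _ PySem.Dict.nodup_keys_empty
  have hg0 : ∀ k, d0.getD k [] = [] := by
    intro k
    rw [hd0, getD_foldl_insertF]
    split <;> simp
  obtain ⟨hkB, hgB⟩ := B_outer cs d0 hn0
  set dB := cs.foldl
      (fun d constraint =>
        (constraint.foldl
          (fun (st : PySem.Dict Int (List (List Int)) × PySem.Set Int) op =>
            if st.1.contains op = true ∧ op ∉ st.2 then
              (st.1.insert op (st.1.getD op [] ++ [constraint]), st.2.add op)
            else st)
          (d, PySem.Set.empty)).1)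
      d0 with hdB
  have hnB : dB.keys.Nodup := by rw [hkB]; exact hn0
  rw [PySem.Dict.items_eq_map_keys dA hnA [], PySem.Dict.items_eq_map_keys dB hnB []]
  rw [hkA, hkB, hk0]
  apply List.map_congr_left
  intro k hk
  have hkops : k ∈ ops := (PySem.Set.mem_ofList _ _).mp hk
  have h1 : dA.getD k [] = cs.filter (fun c => decide (k ∈ c)) := by
    rw [hdA, getD_foldl_insertF]
    simp [hkops]
  have h2 : dB.getD k [] = cs.filter (fun c => decide (k ∈ c)) := by
    rw [hgB k (by rw [hk0]; exact hk), hg0]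
    simp
  rw [h1, h2]
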